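-- pv_equiv track=rewrite | github.com/DorBilia/Software-Engineering | CS-Intro/HomeWork/HW3/id215090598.py | snake_matrix
-- ===== SOURCE A (Python) =====
-- def fill_col(matrix, index, value, direction):
--     if direction:
--         for i in range(len(matrix)):
--             matrix[i][index] = value
--             value += 1
--     else:
--         for i in range(len(matrix) - 1, -1, - 1):
--             matrix[i][index] = value
--             value += 1
--     return matrix
--
-- def snake_matrix(row, col):
--     value = 1
--     flag = True
--     res = [[0 for i in range(col)] for j in range(row)]
--     for c in range(col - 1, -1, -1):
--         res = fill_col(res, c, value, flag)
--         flag = not flag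
--         value += row
--     return res
-- ===== SOURCE B (Python) =====
-- def snake_matrix(row, col):
--     return [
--         [1 + (col - 1 - j) * row + (i if (col - 1 - j) % 2 == 0 else row - 1 - i)
--          for j in range(col)]
--         for i in range(row)
--     ]
-- ===== Notes on version B (the rewrite author's own statement) =====
-- stated objective: simpler
-- what changed: B computes every entry by a direct closed form (k = col-1-j, base = 1+k*row, plus i or row-1-i by the parity of k) in one nested comprehension, replacing A's preallocated zero matrix mutated column by column with an alternating direction flag and a helper.
import Mathlib
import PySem

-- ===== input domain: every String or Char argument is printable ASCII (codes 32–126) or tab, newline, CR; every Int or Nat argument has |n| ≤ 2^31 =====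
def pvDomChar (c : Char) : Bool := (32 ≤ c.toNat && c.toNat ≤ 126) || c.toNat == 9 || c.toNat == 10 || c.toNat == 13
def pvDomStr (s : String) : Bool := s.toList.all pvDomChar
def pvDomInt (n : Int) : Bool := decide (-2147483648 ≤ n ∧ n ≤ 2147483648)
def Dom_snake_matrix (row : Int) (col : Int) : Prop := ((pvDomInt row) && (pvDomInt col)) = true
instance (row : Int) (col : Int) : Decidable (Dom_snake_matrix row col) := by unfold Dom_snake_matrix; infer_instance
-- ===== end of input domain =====

-- B replaces A's column-by-column in-place filling with a per-entry closed form (simpler; same O(row*col) cost).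

-- ===== PORT A =====
-- matrix[i][index] = value is ported as pySetD/pyGetD (exact here: snake_matrix only calls with in-range indices)
def fill_col (matrix : List (List Int)) (index : Int) (value : Int) (direction : Bool) : List (List Int) :=
  if direction then
    ((PySem.List.pyRange 0 (matrix.length : Int) 1).foldl
      (fun (st : List (List Int) × Int) i =>
        (PySem.List.pySetD st.1 i (PySem.List.pySetD (PySem.List.pyGetD st.1 i []) index st.2) , st.2 + 1))
      (matrix, value)).1
  else
    ((PySem.List.pyRange ((matrix.length : Int) - 1) (-1) (-1)).foldl
      (fun (st : List (List Int) × Int) i =>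
        (PySem.List.pySetD st.1 i (PySem.List.pySetD (PySem.List.pyGetD st.1 i []) index st.2) , st.2 + 1))
      (matrix, value)).1

def snake_matrix (row : Int) (col : Int) : List (List Int) :=
  let value : Int := 1
  let flag : Bool := true
  let res : List (List Int) :=
    (PySem.List.pyRange 0 row 1).map (fun _ => (PySem.List.pyRange 0 col 1).map (fun _ => (0 : Int)))
  ((PySem.List.pyRange (col - 1) (-1) (-1)).foldl
    (fun (st : List (List Int) × Int × Bool) c =>
      (fill_col st.1 c st.2.1 st.2.2, st.2.1 + row, !st.2.2))
    (res, value, flag)).1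

-- ===== PORT B =====
def snake_matrix_alt (row : Int) (col : Int) : List (List Int) :=
  (PySem.List.pyRange 0 row 1).map (fun i =>
    (PySem.List.pyRange 0 col 1).map (fun j =>
      if PySem.Int.mod (col - 1 - j) 2 = 0 then 1 + (col - 1 - j) * row + i
      else 1 + (col - 1 - j) * row + (row - 1 - i)))

-- ===== PRECONDITION & SPEC =====
def Spec_snake_matrix (row : Int) (col : Int) (out : List (List Int)) : Prop := out = snake_matrix_alt row col
instance (row : Int) (col : Int) (out : List (List Int)) : Decidable (Spec_snake_matrix row col out) := by unfold Spec_snake_matrix; infer_instance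

-- ===== CLAIM (what is proved, stated in full; the proofs are below) =====
def Claim_equal_snake_matrix : Prop := ∀ (row : Int) (col : Int), Dom_snake_matrix row col → Spec_snake_matrix row col (snake_matrix row col)

-- ===== LEMMAS AND PROOFS =====

-- the ascending fill loop of fill_col (direction = True), entrywise
theorem ascFold (c : Int) (L : Int) :
    ∀ (n : Nat) (a v : Int) (m : List (List Int)), (L - a).toNat = n → 0 ≤ a → (m.length : Int) = L →
      (((PySem.List.pyRange a L 1).foldl
        (fun (st : List (List Int) × Int) i =>
          (PySem.List.pySetD st.1 i (PySem.List.pySetD (PySem.List.pyGetD st.1 i []) c st.2) , st.2 + 1))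
        (m, v)).1.length = m.length) ∧
      ∀ (i : Nat),
        PySem.List.pyGetD ((PySem.List.pyRange a L 1).foldl
          (fun (st : List (List Int) × Int) i =>
            (PySem.List.pySetD st.1 i (PySem.List.pySetD (PySem.List.pyGetD st.1 i []) c st.2) , st.2 + 1))
          (m, v)).1 (i : Int) [] =
          if a ≤ (i : Int) ∧ (i : Int) < L then
            PySem.List.pySetD (PySem.List.pyGetD m (i : Int) []) c (v + ((i : Int) - a))
          else PySem.List.pyGetD m (i : Int) [] := by
  intro n
  induction n with
  | zero =>
    intro a v m hn ha hL
    rw [PySem.List.pyRange_one_eq_nil (by omega)]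
    refine ⟨rfl, ?_⟩
    intro i
    simp only [List.foldl_nil]
    rw [if_neg (by omega)]
  | succ n ih =>
    intro a v m hn ha hL
    rw [PySem.List.pyRange_one_cons (show a < L by omega)]
    simp only [List.foldl_cons]
    have hm'len : ((PySem.List.pySetD m a (PySem.List.pySetD (PySem.List.pyGetD m a []) c v)).length : Int) = L := by
      rw [PySem.List.length_pySetD]; exact hL
    obtain ⟨h1, h2⟩ := ih (a+1) (v+1)
      (PySem.List.pySetD m a (PySem.List.pySetD (PySem.List.pyGetD m a []) c v))
      (by omega) (by omega) hm'len
    refine ⟨h1.trans (PySem.List.length_pySetD _ _ _), ?_⟩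
    intro i
    rw [h2 i]
    have haNat : a = ((a.toNat : Nat) : Int) := (Int.toNat_of_nonneg ha).symm
    have hget : PySem.List.pyGetD (PySem.List.pySetD m a (PySem.List.pySetD (PySem.List.pyGetD m a []) c v)) (i : Int) []
        = if i = a.toNat then PySem.List.pySetD (PySem.List.pyGetD m a []) c v else PySem.List.pyGetD m (i : Int) [] := by
      rw [haNat]
      exact PySem.List.pyGetD_pySetD_natCast m a.toNat i _ [] (by omega)
    rw [hget]
    by_cases hi : (i : Int) = a
    · rw [if_neg (by omega), if_pos (by omega), if_pos (by omega)]
      have : v + ((i : Int) - a) = v := by omega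
      rw [this, ← hi]
    · by_cases hr : a + 1 ≤ (i : Int) ∧ (i : Int) < L
      · rw [if_pos hr, if_neg (by omega), if_pos (by omega)]
        have : v + 1 + ((i : Int) - (a + 1)) = v + ((i : Int) - a) := by ring
        rw [this]
      · rw [if_neg hr, if_neg (by omega), if_neg (by omega)]

-- the descending fill loop of fill_col (direction = False), entrywise
theorem descFold (c : Int) :
    ∀ (n : Nat) (a v : Int) (m : List (List Int)), (a + 1).toNat = n → a < (m.length : Int) →
      (((PySem.List.pyRange a (-1) (-1)).foldl
        (fun (st : List (List Int) × Int) i =>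
          (PySem.List.pySetD st.1 i (PySem.List.pySetD (PySem.List.pyGetD st.1 i []) c st.2) , st.2 + 1))
        (m, v)).1.length = m.length) ∧
      ∀ (i : Nat),
        PySem.List.pyGetD ((PySem.List.pyRange a (-1) (-1)).foldl
          (fun (st : List (List Int) × Int) i =>
            (PySem.List.pySetD st.1 i (PySem.List.pySetD (PySem.List.pyGetD st.1 i []) c st.2) , st.2 + 1))
          (m, v)).1 (i : Int) [] =
          if (i : Int) ≤ a then
            PySem.List.pySetD (PySem.List.pyGetD m (i : Int) []) c (v + (a - (i : Int)))
          else PySem.List.pyGetD m (i : Int) [] := by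
  intro n
  induction n with
  | zero =>
    intro a v m hn ha
    rw [PySem.List.pyRange_neg_one_eq_nil (by omega)]
    refine ⟨rfl, ?_⟩
    intro i
    simp only [List.foldl_nil]
    rw [if_neg (by omega)]
  | succ n ih =>
    intro a v m hn ha
    have ha0 : 0 ≤ a := by omega
    rw [PySem.List.pyRange_neg_one_cons (show (-1 : Int) < a by omega)]
    simp only [List.foldl_cons]
    have hm'len : ((PySem.List.pySetD m a (PySem.List.pySetD (PySem.List.pyGetD m a []) c v)).length : Int)
        = (m.length : Int) := by rw [PySem.List.length_pySetD]
    obtain ⟨h1, h2⟩ := ih (a-1) (v+1)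
      (PySem.List.pySetD m a (PySem.List.pySetD (PySem.List.pyGetD m a []) c v))
      (by omega) (by omega)
    refine ⟨h1.trans (PySem.List.length_pySetD _ _ _), ?_⟩
    intro i
    rw [h2 i]
    have haNat : a = ((a.toNat : Nat) : Int) := (Int.toNat_of_nonneg ha0).symm
    have hget : PySem.List.pyGetD (PySem.List.pySetD m a (PySem.List.pySetD (PySem.List.pyGetD m a []) c v)) (i : Int) []
        = if i = a.toNat then PySem.List.pySetD (PySem.List.pyGetD m a []) c v else PySem.List.pyGetD m (i : Int) [] := by
      rw [haNat]
      exact PySem.List.pyGetD_pySetD_natCast m a.toNat i _ [] (by omega)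
    rw [hget]
    by_cases hi : (i : Int) = a
    · rw [if_neg (by omega), if_pos (by omega), if_pos (by omega)]
      have : v + (a - (i : Int)) = v := by omega
      rw [this, ← hi]
    · by_cases hr : (i : Int) ≤ a - 1
      · rw [if_pos hr, if_neg (by omega), if_pos (by omega)]
        have : v + 1 + (a - 1 - (i : Int)) = v + (a - (i : Int)) := by ring
        rw [this]
      · rw [if_neg hr, if_neg (by omega), if_neg (by omega)]

-- fill_col, entrywise
theorem fill_col_entry (m : List (List Int)) (c v : Int) (dir : Bool) :
    (fill_col m c v dir).length = m.length ∧
    ∀ (i : Nat), i < m.length →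
      PySem.List.pyGetD (fill_col m c v dir) (i : Int) [] =
        PySem.List.pySetD (PySem.List.pyGetD m (i : Int) []) c
          (if dir then v + (i : Int) else v + ((m.length : Int) - 1 - (i : Int))) := by
  cases dir with
  | true =>
    simp only [fill_col, ite_true]
    obtain ⟨h1, h2⟩ := ascFold c (m.length : Int) m.length 0 v m (by omega) le_rfl rfl
    refine ⟨h1, ?_⟩
    intro i hi
    rw [h2 i, if_pos (by constructor <;> omega)]
    have : v + ((i : Int) - 0) = v + (i : Int) := by ring
    rw [this]
  | false =>
    simp only [fill_col, Bool.false_eq_true, ite_false]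
    obtain ⟨h1, h2⟩ := descFold c m.length ((m.length : Int) - 1) v m (by omega) (by omega)
    refine ⟨h1, ?_⟩
    intro i hi
    rw [h2 i, if_pos (by omega)]

-- the column loop of snake_matrix, entrywise
theorem colFold (row : Int) (R C : Nat) :
    ∀ (n : Nat) (c v : Int) (f : Bool) (m : List (List Int)),
      (c + 1).toNat = n → c < (C : Int) → m.length = R → (∀ r ∈ m, r.length = C) →
      (((PySem.List.pyRange c (-1) (-1)).foldl
        (fun (st : List (List Int) × Int × Bool) c =>
          (fill_col st.1 c st.2.1 st.2.2, st.2.1 + row, !st.2.2)) (m, v, f)).1.length = R) ∧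
      (∀ r ∈ ((PySem.List.pyRange c (-1) (-1)).foldl
        (fun (st : List (List Int) × Int × Bool) c =>
          (fill_col st.1 c st.2.1 st.2.2, st.2.1 + row, !st.2.2)) (m, v, f)).1, r.length = C) ∧
      ∀ (i j : Nat), i < R → j < C →
        PySem.List.pyGetD (PySem.List.pyGetD (((PySem.List.pyRange c (-1) (-1)).foldl
          (fun (st : List (List Int) × Int × Bool) c =>
            (fill_col st.1 c st.2.1 st.2.2, st.2.1 + row, !st.2.2)) (m, v, f)).1) (i : Int) []) (j : Int) 0 =
          if (j : Int) ≤ c then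
            (if (if (c - (j : Int)) % 2 = 0 then f else !f) = true
             then v + (c - (j : Int)) * row + (i : Int)
             else v + (c - (j : Int)) * row + ((R : Int) - 1 - (i : Int)))
          else PySem.List.pyGetD (PySem.List.pyGetD m (i : Int) []) (j : Int) 0 := by
  intro n
  induction n with
  | zero =>
    intro c v f m hn hc hmR hrows
    rw [PySem.List.pyRange_neg_one_eq_nil (by omega)]
    simp only [List.foldl_nil]
    refine ⟨hmR, hrows, ?_⟩
    intro i j hi hj
    rw [if_neg (by omega)]
  | succ n ih =>
    intro c v f m hn hc hmR hrows
    have hc0 : 0 ≤ c := by omega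
    rw [PySem.List.pyRange_neg_one_cons (show (-1 : Int) < c by omega)]
    simp only [List.foldl_cons]
    obtain ⟨hf1, hf2⟩ := fill_col_entry m c v f
    have hm1R : (fill_col m c v f).length = R := hf1.trans hmR
    have hm1rows : ∀ r ∈ fill_col m c v f, r.length = C := by
      intro r hr
      obtain ⟨k, hk, hrk⟩ := List.mem_iff_getElem.mp hr
      have hkm : k < m.length := by rw [← hf1]; exact hk
      have : PySem.List.pyGetD (fill_col m c v f) (k : Int) [] = r := by
        rw [PySem.List.pyGetD_natCast, List.getD_eq_getElem _ _ hk, hrk]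
      rw [← this, hf2 k hkm, PySem.List.length_pySetD]
      have : PySem.List.pyGetD m (k : Int) [] ∈ m := by
        rw [PySem.List.pyGetD_natCast, List.getD_eq_getElem _ _ hkm]
        exact List.getElem_mem _
      exact hrows _ this
    obtain ⟨g1, g2, g3⟩ := ih (c-1) (v+row) (!f) (fill_col m c v f) (by omega) (by omega) hm1R hm1rows
    refine ⟨g1, g2, ?_⟩
    intro i j hi hj
    rw [g3 i j hi hj]
    have him : i < m.length := by omega
    have hfi := hf2 i him
    have hmi_len : (PySem.List.pyGetD m (i : Int) []).length = C := by
      apply hrows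
      rw [PySem.List.pyGetD_natCast, List.getD_eq_getElem _ _ him]
      exact List.getElem_mem _
    by_cases hjc : (j : Int) ≤ c - 1
    · rw [if_pos hjc, if_pos (show (j : Int) ≤ c by omega)]
      have hb : (if (c - 1 - (j : Int)) % 2 = 0 then !f else !(!f)) = (if (c - (j : Int)) % 2 = 0 then f else !f) := by
        by_cases hp : (c - 1 - (j : Int)) % 2 = 0
        · rw [if_pos hp, if_neg (show ¬ (c - (j : Int)) % 2 = 0 by omega)]
        · rw [if_neg hp, if_pos (show (c - (j : Int)) % 2 = 0 by omega), Bool.not_not]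
      have hv1 : v + row + (c - 1 - (j : Int)) * row + (i : Int) = v + (c - (j : Int)) * row + (i : Int) := by ring
      have hv2 : v + row + (c - 1 - (j : Int)) * row + ((R : Int) - 1 - (i : Int)) = v + (c - (j : Int)) * row + ((R : Int) - 1 - (i : Int)) := by ring
      rw [hb, hv1, hv2]
    · by_cases hjeq : (j : Int) = c
      · rw [if_neg hjc, if_pos (show (j : Int) ≤ c by omega), hfi]
        have hcNat : c = ((c.toNat : Nat) : Int) := (Int.toNat_of_nonneg hc0).symm
        have hjNat : j = c.toNat := by omega
        rw [hcNat, PySem.List.pyGetD_pySetD_natCast _ _ _ _ _ (by omega), if_pos hjNat]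
        have h0 : ((c.toNat : Nat) : Int) - (j : Int) = 0 := by omega
        rw [h0]
        cases f <;> simp <;> omega
      · rw [if_neg hjc, if_neg (show ¬ (j : Int) ≤ c by omega), hfi]
        have hcNat : c = ((c.toNat : Nat) : Int) := (Int.toNat_of_nonneg hc0).symm
        rw [hcNat, PySem.List.pyGetD_pySetD_natCast _ _ _ _ _ (by omega), if_neg (show ¬ j = c.toNat by omega)]

-- the two ports agree on every input
theorem snake_eq (row col : Int) : snake_matrix row col = snake_matrix_alt row col := by
  simp only [snake_matrix]
  have hm0len : ((PySem.List.pyRange 0 row 1).map (fun _ => (PySem.List.pyRange 0 col 1).map (fun _ => (0 : Int)))).length = row.toNat := by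
    simp [PySem.List.length_pyRange_one]
  have hm0rows : ∀ r ∈ (PySem.List.pyRange 0 row 1).map (fun _ => (PySem.List.pyRange 0 col 1).map (fun _ => (0 : Int))), r.length = col.toNat := by
    intro r hr
    obtain ⟨x, -, rfl⟩ := List.mem_map.mp hr
    simp [PySem.List.length_pyRange_one]
  obtain ⟨g1, g2, g3⟩ := colFold row row.toNat col.toNat col.toNat (col - 1) 1 true _ (by omega) (by omega) hm0len hm0rows
  apply List.ext_getElem
  · rw [g1]; simp [snake_matrix_alt, PySem.List.length_pyRange_one]
  intro i h1 h2
  have hi' : i < row.toNat := by rw [g1] at h1; exact h1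
  apply List.ext_getElem
  · have hmem := List.getElem_mem h1
    rw [g2 _ hmem]
    simp [snake_matrix_alt, PySem.List.length_pyRange_one]
  intro j hj1 hj2
  have hj' : j < col.toNat := by
    have hmem := List.getElem_mem h1
    rw [g2 _ hmem] at hj1; exact hj1
  have e := g3 i j hi' hj'
  rw [PySem.List.pyGetD_natCast _ i, List.getD_eq_getElem _ _ h1] at e
  rw [PySem.List.pyGetD_natCast _ j, List.getD_eq_getElem _ _ hj1] at e
  rw [e, if_pos (show (j : Int) ≤ col - 1 by omega)]
  simp only [snake_matrix_alt, List.getElem_map, PySem.List.getElem_pyRange_one, zero_add]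
  rw [PySem.Int.mod_eq_emod_of_pos (by norm_num)]
  have hrow : ((row.toNat : Nat) : Int) = row := by omega
  by_cases hp : (col - 1 - (j : Int)) % 2 = 0
  · rw [if_pos hp, if_pos hp, if_pos rfl]
  · rw [if_neg hp, if_neg hp, Bool.not_true, if_neg (by simp), hrow]

-- ===== VERDICT (by name: the statement is the Claim_ definition above) =====
theorem snake_matrix_spec : Claim_equal_snake_matrix := by
  intro row col _
  unfold Spec_snake_matrix
  exact snake_eq row col
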